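-- pv_equiv track=rewrite | github.com/AgnesMuradyan/EPUB_CONVERTER | pdf_to_epub/converter.py | normalize_multiline_text
-- ===== SOURCE A (Python) =====
-- def normalize_multiline_text(text: str) -> str:
--     """Join non-heading lines separated by newlines into continuous text."""
--     lines = [line.strip() for line in text.splitlines() if line.strip()]
--     normalized = []
--
--     for line in lines:
--         if line.isupper() or line.endswith(":"):
--             normalized.append("\n" + line + "\n")
--         else:
--             if normalized and not normalized[-1].endswith("\n"):
--                 normalized[-1] += " " + line
--             else:
--                 normalized.append(line)
--
--     return "\n".join(l.strip() for l in normalized if l.strip())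
-- ===== SOURCE B (Python) =====
-- def normalize_multiline_text(text: str) -> str:
--     """Join non-heading lines separated by newlines into continuous text."""
--     def is_heading(line: str) -> bool:
--         return line.isupper() or line.endswith(":")
--
--     lines = [line.strip() for line in text.splitlines() if line.strip()]
--     pieces = []
--     i = 0
--     n = len(lines)
--     while i < n:
--         if is_heading(lines[i]):
--             pieces.append(lines[i])
--             i += 1
--         else:
--             j = i
--             while j < n and not is_heading(lines[j]):
--                 j += 1
--             pieces.append(" ".join(lines[i:j]))
--             i = j
--     return "\n".join(pieces)
-- ===== Notes on version B (the rewrite author's own statement) =====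
-- stated objective: alternative
-- what changed: A's stateful single pass that appends newline-wrapped headings and grows the last list element by repeated string concatenation, then re-strips and re-filters everything before the final join, is replaced by a two-stage span scan: clean the lines once, then partition them into single headings and maximal non-heading runs, each run joined with single spaces in one step.
import Mathlib
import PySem

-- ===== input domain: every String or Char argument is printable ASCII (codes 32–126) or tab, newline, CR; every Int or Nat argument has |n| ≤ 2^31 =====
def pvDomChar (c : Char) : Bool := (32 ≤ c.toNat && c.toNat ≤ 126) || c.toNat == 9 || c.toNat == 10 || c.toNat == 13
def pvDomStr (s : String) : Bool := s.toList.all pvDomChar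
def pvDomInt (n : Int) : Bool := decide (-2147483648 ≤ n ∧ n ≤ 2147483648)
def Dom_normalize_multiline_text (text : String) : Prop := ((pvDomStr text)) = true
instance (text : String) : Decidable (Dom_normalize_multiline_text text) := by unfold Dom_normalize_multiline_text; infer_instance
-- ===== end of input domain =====

-- B replaces A's stateful accumulator (which grows the last list element in place and
-- re-strips/re-filters everything at the end) by a two-stage span scan: partition the
-- cleaned lines into maximal prose runs / single headings and join each run once.

-- hand port of Python str.isupper(), exact on ASCII: at least one cased character and
-- no lowercase character (used by both ports — it is the shared heading predicate)
def pvIsupper (l : List Char) : Bool :=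
  l.any (fun c => PySem.Chars.isupper c || PySem.Chars.islower c) &&
  l.all (fun c => !PySem.Chars.islower c)

def pvIsHeading (l : List Char) : Bool := pvIsupper l || PySem.Chars.endswith l [':']

-- ===== PORT A =====
-- '[line.strip() for line in … if line.strip()]' and the final
-- '(l.strip() for l in normalized if l.strip())' are the same strip-and-drop-empties pass
def pvClean (xs : List (List Char)) : List (List Char) :=
  (xs.map PySem.Chars.strip).filter (fun l => l ≠ [])

-- one iteration of A's for-loop over `normalized`
def pvStepA (acc : List (List Char)) (l : List Char) : List (List Char) :=
  if pvIsHeading l then acc ++ ['\n' :: (l ++ ['\n'])]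
  else
    match acc.getLast? with
    | some last =>
        if PySem.Chars.endswith last ['\n'] then acc ++ [l]
        else acc.dropLast ++ [last ++ ' ' :: l]
    | none => [l]

def normalize_multiline_text (text : String) : String :=
  let lines := pvClean (PySem.Chars.splitlines text.toList)
  let normalized := lines.foldl pvStepA []
  String.ofList (PySem.Chars.join ['\n'] (pvClean normalized))

-- ===== PORT B =====
-- the span scan of Source B: a heading is its own piece; a maximal run of non-heading
-- lines (lines[i:j] with j the next heading index) becomes one space-joined piece
def pvPieces : List (List Char) → List (List Char)
  | [] => []
  | l :: rest =>
    if pvIsHeading l then l :: pvPieces rest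
    else
      PySem.Chars.join [' '] (l :: rest.takeWhile (fun x => !pvIsHeading x)) ::
        pvPieces (rest.dropWhile (fun x => !pvIsHeading x))
  termination_by xs => xs.length
  decreasing_by
    all_goals have := List.length_dropWhile_le (fun x => !pvIsHeading x) rest
    all_goals simp
    all_goals omega

def normalize_multiline_text_alt (text : String) : String :=
  let lines := ((PySem.Chars.splitlines text.toList).map PySem.Chars.strip).filter (fun l => l ≠ [])
  String.ofList (PySem.Chars.join ['\n'] (pvPieces lines))

-- ===== PRECONDITION & SPEC =====
def Spec_normalize_multiline_text (text : String) (out : String) : Prop := out = normalize_multiline_text_alt text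
instance (text : String) (out : String) : Decidable (Spec_normalize_multiline_text text out) := by unfold Spec_normalize_multiline_text; infer_instance

-- ===== CLAIM (what is proved, stated in full; the proofs are below) =====
def Claim_equal_normalize_multiline_text : Prop := ∀ (text : String), Dom_normalize_multiline_text text → Spec_normalize_multiline_text text (normalize_multiline_text text)

-- ===== LEMMAS AND PROOFS =====

-- a line that survives A's cleaning pass: nonempty, no whitespace at either end
def PvStripped (l : List Char) : Prop :=
  l ≠ [] ∧ (∀ c, l.head? = some c → PySem.Chars.isspace c = false)
        ∧ (∀ c, l.getLast? = some c → PySem.Chars.isspace c = false)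

-- every element A's accumulator can be extended after is a wrapped heading
def PvClosed (acc : List (List Char)) : Prop :=
  ∀ x, acc.getLast? = some x → PySem.Chars.endswith x ['\n'] = true

lemma pv_head?_dropWhile {p : Char → Bool} {l : List Char} {x : Char}
    (h : (List.dropWhile p l).head? = some x) : p x = false := by
  have := List.head?_dropWhile_not p l
  simp [h] at this; simpa using this

lemma pv_dropWhile_eq_self {p : Char → Bool} {l : List Char}
    (h : ∀ c, l.head? = some c → p c = false) : List.dropWhile p l = l := by
  cases l with
  | nil => rfl
  | cons a t => exact List.dropWhile_cons_of_neg (by simp [h a rfl])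

lemma pv_strip_eq_self {l : List Char} (h : PvStripped l) : PySem.Chars.strip l = l := by
  obtain ⟨hne, hh, hl⟩ := h
  have h1 : PySem.Chars.lstrip l = l := pv_dropWhile_eq_self hh
  have h2 : PySem.Chars.rstrip l = l := by
    unfold PySem.Chars.rstrip
    rw [pv_dropWhile_eq_self (fun c hc => hl c (by rwa [List.getLast?_eq_head?_reverse]))]
    exact l.reverse_reverse
  simp [PySem.Chars.strip, h1, h2]

lemma pv_stripped_strip {x : List Char} (h : PySem.Chars.strip x ≠ []) :
    PvStripped (PySem.Chars.strip x) := by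
  refine ⟨h, ?_, ?_⟩
  · intro c hc
    -- strip x is a prefix of lstrip x, so shares its head
    have hsuf : List.dropWhile PySem.Chars.isspace (PySem.Chars.lstrip x).reverse
        <:+ (PySem.Chars.lstrip x).reverse := List.dropWhile_suffix _
    obtain ⟨t, ht⟩ := hsuf
    have hx : PySem.Chars.lstrip x = PySem.Chars.strip x ++ t.reverse := by
      have := congrArg List.reverse ht
      simpa [PySem.Chars.strip, PySem.Chars.rstrip] using this.symm
    have hhead : (PySem.Chars.lstrip x).head? = some c := by
      rw [hx, List.head?_append]
      simp [hc]
    exact pv_head?_dropWhile (by simpa [PySem.Chars.lstrip] using hhead)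
  · intro c hc
    rw [List.getLast?_eq_head?_reverse] at hc
    have : (List.dropWhile PySem.Chars.isspace (PySem.Chars.lstrip x).reverse).head? = some c := by
      simpa [PySem.Chars.strip, PySem.Chars.rstrip] using hc
    exact pv_head?_dropWhile this

lemma pv_isspace_nl : PySem.Chars.isspace '\n' = true := by decide

lemma pv_endswith_wrap (x : List Char) : PySem.Chars.endswith (x ++ ['\n']) ['\n'] = true := by
  simp [PySem.Chars.endswith, List.isSuffixOf_iff_suffix]

lemma pv_getLast?_append_cons (p : List Char) (a : Char) {r : List Char} (h : r ≠ []) :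
    (p ++ a :: r).getLast? = r.getLast? := by
  rw [List.getLast?_eq_head?_reverse, List.getLast?_eq_head?_reverse, List.reverse_append]
  cases hr : r.reverse with
  | nil => exact absurd (by simpa using congrArg List.reverse hr) h
  | cons b s => simp [hr]

lemma pv_endswith_newline_false {l : List Char} (h : PvStripped l) :
    PySem.Chars.endswith l ['\n'] = false := by
  obtain ⟨hne, _, hl⟩ := h
  by_contra hcon
  have hsuf : ['\n'] <:+ l := by
    have : PySem.Chars.endswith l ['\n'] = true := by
      cases hb : PySem.Chars.endswith l ['\n'] with
      | false => exact absurd hb hcon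
      | true => rfl
    simpa [PySem.Chars.endswith, List.isSuffixOf_iff_suffix] using this
  obtain ⟨t, ht⟩ := hsuf
  have : l.getLast? = some '\n' := by rw [← ht]; simp
  simpa [pv_isspace_nl] using hl '\n' this

lemma pv_strip_wrap {l : List Char} (h : PvStripped l) :
    PySem.Chars.strip ('\n' :: (l ++ ['\n'])) = l := by
  obtain ⟨hne, hh, hl⟩ := h
  have h1 : PySem.Chars.lstrip ('\n' :: (l ++ ['\n'])) = l ++ ['\n'] := by
    unfold PySem.Chars.lstrip
    rw [List.dropWhile_cons_of_pos (by simpa using pv_isspace_nl)]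
    refine pv_dropWhile_eq_self ?_
    intro c hc
    cases l with
    | nil => exact absurd rfl hne
    | cons a t => exact hh c (by simpa using hc)
  have h2 : PySem.Chars.rstrip (l ++ ['\n']) = l := by
    unfold PySem.Chars.rstrip
    rw [List.reverse_append]
    simp only [List.reverse_singleton, List.singleton_append]
    rw [List.dropWhile_cons_of_pos (by simpa using pv_isspace_nl)]
    rw [pv_dropWhile_eq_self (fun c hc => hl c (by rwa [List.getLast?_eq_head?_reverse]))]
    exact l.reverse_reverse
  simp [PySem.Chars.strip, h1, h2]

lemma pv_stripped_join {p r : List Char} (hp : PvStripped p) (hr : PvStripped r) :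
    PvStripped (p ++ ' ' :: r) := by
  refine ⟨by simp, ?_, ?_⟩
  · intro c hc
    obtain ⟨a, t, rfl⟩ := List.exists_cons_of_ne_nil hp.1
    exact hp.2.1 c (by simpa using hc)
  · intro c hc
    rw [pv_getLast?_append_cons p ' ' hr.1] at hc
    exact hr.2.2 c hc

lemma pv_join_shift (p r : List Char) (l : List (List Char)) :
    PySem.Chars.join [' '] ((p ++ ' ' :: r) :: l) = PySem.Chars.join [' '] (p :: r :: l) := by
  cases l with
  | nil =>
    rw [PySem.Chars.join_singleton, PySem.Chars.join_cons_cons, PySem.Chars.join_singleton]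
    simp
  | cons a t =>
    rw [PySem.Chars.join_cons_cons, PySem.Chars.join_cons_cons, PySem.Chars.join_cons_cons]
    simp

lemma pv_clean_append (a b : List (List Char)) : pvClean (a ++ b) = pvClean a ++ pvClean b := by
  simp [pvClean]

lemma pv_clean_concat_stripped {l : List Char} (h : PvStripped l) (acc : List (List Char)) :
    pvClean (acc ++ [l]) = pvClean acc ++ [l] := by
  rw [pv_clean_append]
  simp [pvClean, pv_strip_eq_self h, h.1]

lemma pv_clean_concat_wrap {l : List Char} (h : PvStripped l) (acc : List (List Char)) :
    pvClean (acc ++ ['\n' :: (l ++ ['\n'])]) = pvClean acc ++ [l] := by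
  rw [pv_clean_append]
  simp [pvClean, pv_strip_wrap h, h.1]

lemma pv_mem_clean {l : List Char} {xs : List (List Char)} (h : l ∈ pvClean xs) : PvStripped l := by
  simp only [pvClean, List.mem_filter, List.mem_map, decide_eq_true_eq] at h
  obtain ⟨⟨y, _, rfl⟩, hne⟩ := h
  exact pv_stripped_strip hne

lemma pv_closed_concat_wrap (acc : List (List Char)) (l : List Char) :
    PvClosed (acc ++ ['\n' :: (l ++ ['\n'])]) := by
  intro x hx
  rw [List.getLast?_concat] at hx
  cases hx
  exact pv_endswith_wrap ('\n' :: l)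

lemma pv_main (n : Nat) : ∀ (lines : List (List Char)), lines.length ≤ n →
    (∀ l ∈ lines, PvStripped l) →
    ((∀ acc, PvClosed acc →
        pvClean (List.foldl pvStepA acc lines) = pvClean acc ++ pvPieces lines)
     ∧ (∀ acc p, PvClosed acc → PvStripped p →
        pvClean (List.foldl pvStepA (acc ++ [p]) lines) =
          pvClean acc ++ (PySem.Chars.join [' '] (p :: lines.takeWhile (fun x => !pvIsHeading x))
            :: pvPieces (lines.dropWhile (fun x => !pvIsHeading x))))) := by
  induction n with
  | zero =>
    intro lines hlen hcl
    have hnil : lines = [] := List.eq_nil_of_length_eq_zero (Nat.le_zero.mp hlen)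
    subst hnil
    constructor
    · intro acc _
      simp [pvPieces]
    · intro acc p _ hp
      simp only [List.foldl_nil, List.takeWhile_nil, List.dropWhile_nil]
      rw [pv_clean_concat_stripped hp acc, PySem.Chars.join_singleton]
      simp [pvPieces]
  | succ n ih =>
    intro lines hlen hcl
    cases lines with
    | nil => exact (ih [] (Nat.zero_le n) (by intro l hl; cases hl))
    | cons l rest =>
      have hlr : rest.length ≤ n := by simpa using hlen
      have hclr : ∀ x ∈ rest, PvStripped x := fun x hx => hcl x (List.mem_cons_of_mem l hx)
      have hl : PvStripped l := hcl l List.mem_cons_self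
      constructor
      · -- closed accumulator
        intro acc hacc
        rw [List.foldl_cons]
        by_cases hH : pvIsHeading l = true
        · have hstep : pvStepA acc l = acc ++ ['\n' :: (l ++ ['\n'])] := by
            simp [pvStepA, hH]
          rw [hstep, (ih rest hlr hclr).1 _ (pv_closed_concat_wrap acc l),
              pv_clean_concat_wrap hl acc]
          simp [pvPieces, hH]
        · have hstep : pvStepA acc l = acc ++ [l] := by
            simp only [pvStepA, hH, if_false, Bool.false_eq_true]
            cases hlast : acc.getLast? with
            | none => simp [List.getLast?_eq_none_iff.mp hlast]
            | some x => simp [hacc x hlast]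
          rw [hstep, (ih rest hlr hclr).2 acc l hacc hl]
          simp [pvPieces, hH]
      · -- open accumulator p
        intro acc p hacc hp
        rw [List.foldl_cons]
        by_cases hH : pvIsHeading l = true
        · have hstep : pvStepA (acc ++ [p]) l = (acc ++ [p]) ++ ['\n' :: (l ++ ['\n'])] := by
            simp [pvStepA, hH]
          rw [hstep, (ih rest hlr hclr).1 _ (pv_closed_concat_wrap (acc ++ [p]) l),
              pv_clean_concat_wrap hl (acc ++ [p]), pv_clean_concat_stripped hp acc]
          simp [pvPieces, hH, PySem.Chars.join_singleton]
        · have hstep : pvStepA (acc ++ [p]) l = acc ++ [p ++ ' ' :: l] := by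
            simp only [pvStepA, hH, if_false, Bool.false_eq_true, List.getLast?_concat,
                       pv_endswith_newline_false hp, List.dropLast_concat]
          rw [hstep, (ih rest hlr hclr).2 acc (p ++ ' ' :: l) hacc (pv_stripped_join hp hl)]
          rw [pv_join_shift]
          simp [hH]

theorem normalize_multiline_text_spec : Claim_equal_normalize_multiline_text := by
  intro text _
  unfold Spec_normalize_multiline_text normalize_multiline_text normalize_multiline_text_alt
  have hcl : ∀ l ∈ pvClean (PySem.Chars.splitlines text.toList), PvStripped l :=
    fun l hl => pv_mem_clean hl
  have hmain := (pv_main (pvClean (PySem.Chars.splitlines text.toList)).length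
      (pvClean (PySem.Chars.splitlines text.toList)) le_rfl hcl).1 [] (by intro x hx; cases hx)
  simp only [pvClean] at hmain ⊢
  rw [hmain]
  simp
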